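-- pv_equiv track=rewrite | github.com/guozhonghao1994/BU_EC602_Assignment | assignment10/wordbrainsolver.py | hint_match
-- ===== SOURCE A (Python) =====
-- def hint_match(current, hints, puzzles):
--     """Match hint for answer"""
--     hint = {}
--     for idx, i in enumerate(hints):
--         if i != '*':
--             hint[idx] = i
--     count = 0
--     next_word = ''
--     for i in current:
--         next_word = next_word + puzzles[ord(i)]
--     for idx, i in enumerate(next_word):
--         try:
--             temp = hint[idx]
--         except KeyError:
--             continue
--         if temp == i:
--             count += 1
--     return bool(count == len(hint))
-- ===== SOURCE B (Python) =====
-- def hint_match(current, hints, puzzles):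
--     """Match hint for answer"""
--     next_word = ''.join(puzzles[ord(c)] for c in current)
--     return all(idx < len(next_word) and next_word[idx] == h
--                for idx, h in enumerate(hints) if h != '*')
-- ===== Notes on version B (the rewrite author's own statement) =====
-- stated objective: simpler
-- what changed: Instead of building an index->char dict from hints and counting matches while scanning the built word, B builds the word with a join and iterates directly over the hint positions, checking each non-'*' position in bounds against the word with all(); the dict and the count disappear.
import Mathlib
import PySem

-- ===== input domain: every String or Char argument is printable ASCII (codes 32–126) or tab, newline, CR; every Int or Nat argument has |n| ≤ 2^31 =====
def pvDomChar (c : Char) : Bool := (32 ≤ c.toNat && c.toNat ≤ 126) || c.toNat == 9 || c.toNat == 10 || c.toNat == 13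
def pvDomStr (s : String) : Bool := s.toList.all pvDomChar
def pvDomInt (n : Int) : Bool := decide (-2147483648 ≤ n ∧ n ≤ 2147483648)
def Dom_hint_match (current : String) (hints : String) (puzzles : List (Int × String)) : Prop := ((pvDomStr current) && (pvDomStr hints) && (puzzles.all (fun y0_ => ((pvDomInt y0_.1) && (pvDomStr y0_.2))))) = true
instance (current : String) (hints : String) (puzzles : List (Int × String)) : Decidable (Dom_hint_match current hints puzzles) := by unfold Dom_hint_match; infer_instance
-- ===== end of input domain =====

-- B replaces A's hint-index dict and match counter by a direct all() over the non-'*' hint positions (simpler decomposition, same cost).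


-- ===== PORT A =====
-- hint = {}; for idx, i in enumerate(hints): if i != '*': hint[idx] = i
def pvHintA (H : List Char) : PySem.Dict Int Char :=
  (PySem.List.enumerate H 0).foldl
    (fun d p => if p.2 ≠ '*' then d.insert p.1 p.2 else d) PySem.Dict.empty

def hint_match (current : String) (hints : String) (puzzles : List (Int × String)) : Bool :=
  -- next_word = ''; for i in current: next_word = next_word + puzzles[ord(i)]
  -- (dict lookup = first match in the association list; none = KeyError, excluded by Pre_)
  match current.toList.foldl
      (fun acc c =>
        match acc, puzzles.lookup ((c.toNat : Int)) with
        | some w, some s => some (w ++ s.toList)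
        | _, _ => none) (some []) with
  | none => false   -- Python raises KeyError here; outside Pre_
  | some nw =>
    -- count = 0; for idx, i in enumerate(next_word): try: temp = hint[idx] … if temp == i: count += 1
    -- return bool(count == len(hint))
    decide ((PySem.List.enumerate nw 0).foldl
        (fun cnt p =>
          match (pvHintA hints.toList).get? p.1 with
          | none => cnt
          | some t => if t = p.2 then cnt + 1 else cnt) (0 : Int)
      = ((pvHintA hints.toList).size : Int))

-- ===== PORT B =====
-- all(idx < len(next_word) and next_word[idx] == h for idx, h in enumerate(hints) if h != '*')
def pvCheckB (nw : List Char) (H : List Char) : Bool :=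
  ((PySem.List.enumerate H 0).filter (fun p => p.2 != '*')).all
    (fun p => decide (p.1 < (nw.length : Int)) && (nw.getD p.1.toNat ' ' == p.2))

def hint_match_alt (current : String) (hints : String) (puzzles : List (Int × String)) : Bool :=
  -- next_word = ''.join(puzzles[ord(c)] for c in current)
  match current.toList.mapM (fun c => puzzles.lookup ((c.toNat : Int))) with
  | none => false   -- Python raises KeyError here; outside Pre_
  | some parts => pvCheckB ((parts.map String.toList).flatten) hints.toList

-- ===== PRECONDITION & SPEC =====
-- Pre_ excludes exactly the inputs where some character of current has no entry in puzzles: Python A raises KeyError there.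
def Pre_hint_match (current : String) (hints : String) (puzzles : List (Int × String)) : Prop :=
  (current.toList.all (fun c => (puzzles.lookup ((c.toNat : Int))).isSome)) = true
instance (current : String) (hints : String) (puzzles : List (Int × String)) : Decidable (Pre_hint_match current hints puzzles) := by unfold Pre_hint_match; infer_instance
def pvWitness_hint_match : String × String × (List (Int × String)) := ("a", "*b", [(97, "ab")])

def Spec_hint_match (current : String) (hints : String) (puzzles : List (Int × String)) (out : Bool) : Prop := out = hint_match_alt current hints puzzles
instance (current : String) (hints : String) (puzzles : List (Int × String)) (out : Bool) : Decidable (Spec_hint_match current hints puzzles out) := by unfold Spec_hint_match; infer_instance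

-- ===== CLAIM (what is proved, stated in full; the proofs are below) =====
def Claim_equal_hint_match : Prop := ∀ (current : String) (hints : String) (puzzles : List (Int × String)), Dom_hint_match current hints puzzles → Pre_hint_match current hints puzzles → Spec_hint_match current hints puzzles (hint_match current hints puzzles)

-- ===== LEMMAS AND PROOFS =====

-- A's word-building foldl equals B's mapM-and-flatten, accumulator generalised; both are none exactly on a failed lookup.
theorem pv_word_eq (puzzles : List (Int × String)) :
    ∀ (cs : List Char) (w : List Char),
      cs.foldl (fun acc c =>
        match acc, puzzles.lookup ((c.toNat : Int)) with
        | some w, some s => some (w ++ s.toList)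
        | _, _ => none) (some w)
      = (cs.mapM (fun c => puzzles.lookup ((c.toNat : Int)))).map
          (fun parts => w ++ (parts.map String.toList).flatten) := by
  intro cs
  induction cs with
  | nil => intro w; simp
  | cons c cs ih =>
    intro w
    cases h : puzzles.lookup ((c.toNat : Int)) with
    | none =>
      have hnone : ∀ (l : List Char), l.foldl (fun acc c =>
          match acc, puzzles.lookup ((c.toNat : Int)) with
          | some w, some s => some (w ++ s.toList)
          | _, _ => none) (none : Option (List Char)) = none := by
        intro l; induction l with
        | nil => rfl
        | cons x l ihl => simpa using ihl
      simp [List.mapM_cons, h, hnone]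
    | some s =>
      simp only [List.foldl_cons, List.mapM_cons, h]
      rw [ih (w ++ s.toList)]
      cases cs.mapM (fun c => puzzles.lookup ((c.toNat : Int))) <;> simp

-- Under Pre_, every lookup succeeds, so B's mapM succeeds.
theorem pv_mapM_isSome (puzzles : List (Int × String)) :
    ∀ (cs : List Char), (∀ c ∈ cs, (puzzles.lookup ((c.toNat : Int))).isSome = true) →
      (cs.mapM (fun c => puzzles.lookup ((c.toNat : Int)))).isSome = true := by
  intro cs
  induction cs with
  | nil => intro _; simp
  | cons c cs ih =>
    intro h
    have h1 := h c (by simp)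
    cases hl : puzzles.lookup ((c.toNat : Int)) with
    | none => rw [hl] at h1; simp at h1
    | some s =>
      have h2 := ih (fun x hx => h x (by simp [hx]))
      cases hm : cs.mapM (fun c => puzzles.lookup ((c.toNat : Int))) with
      | none => rw [hm] at h2; simp at h2
      | some parts => simp [List.mapM_cons, hl, hm]

theorem pv_enum_nodup (xs : List Char) : (PySem.List.enumerate xs 0).Nodup := by
  have h := PySem.List.pairwise_lt_enumerate (xs := xs) (s := 0)
  exact h.imp (fun {a b} hlt => by intro he; rw [he] at hlt; exact lt_irrefl _ hlt)

-- The non-'*' entries of enumerate(hints) have pairwise-distinct indices.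
theorem pv_E_fst_nodup (H : List Char) :
    ((((PySem.List.enumerate H 0).filter (fun p => p.2 != '*'))).map (fun p : Int × Char => p.1)).Nodup := by
  have h := (PySem.List.pairwise_lt_enumerate (xs := H) (s := 0)).filter (fun p => p.2 != '*')
  have h2 := h.map (f := fun p : Int × Char => p.1) (S := (· < ·)) (by intro a b hb; exact hb)
  exact h2.imp (fun {a b} hlt => by intro he; rw [he] at hlt; exact lt_irrefl _ hlt)

-- A's hint dict is exactly the non-'*' entries of enumerate(hints), as an items list.
theorem pv_items_E (H : List Char) :
    (pvHintA H).items = (PySem.List.enumerate H 0).filter (fun p => p.2 != '*') := by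
  unfold pvHintA
  rw [PySem.List.foldl_ite_eq_foldl_filter]
  have hfc : (PySem.List.enumerate H 0).filter (fun p => decide (p.2 ≠ '*'))
      = (PySem.List.enumerate H 0).filter (fun p => p.2 != '*') := by
    apply List.filter_congr; intro x _; simp [bne, Bool.beq_eq_decide_eq]
  rw [hfc]
  have hone := PySem.Dict.items_foldl_insert_fresh
    (l := (PySem.List.enumerate H 0).filter (fun p => p.2 != '*'))
    (k := fun p : Int × Char => p.1) (v := fun p : Int × Char => p.2)
    (d := PySem.Dict.empty)
    (by intro a _; simp [PySem.Dict.contains_empty])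
    (pv_E_fst_nodup H)
  simpa using hone

-- The count over the word's positions and the check over the hint's positions count/decide the same pair set.
theorem pv_count_eq (H nw : List Char) (hint : PySem.Dict Int Char)
    (hitems : hint.items = (PySem.List.enumerate H 0).filter (fun p => p.2 != '*'))
    (hkeys : hint.keys.Nodup) :
    (PySem.List.enumerate nw 0).countP (fun q => hint.get? q.1 == some q.2)
    = ((PySem.List.enumerate H 0).filter (fun p => p.2 != '*')).countP
        (fun p => decide (p.1 < (nw.length : Int)) && (nw.getD p.1.toNat ' ' == p.2)) := by
  set E := (PySem.List.enumerate H 0).filter (fun p => p.2 != '*') with hE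
  have hget : ∀ q : Int × Char, (hint.get? q.1 = some q.2) ↔ q ∈ E := by
    intro q
    rw [PySem.Dict.get?_eq_some_iff_mem_items hint q.1 q.2 hkeys, hitems]
  rw [List.countP_eq_length_filter, List.countP_eq_length_filter]
  apply List.Perm.length_eq
  have hnd1 : ((PySem.List.enumerate nw 0).filter (fun q => hint.get? q.1 == some q.2)).Nodup :=
    (pv_enum_nodup nw).filter _
  have hnd2 : (E.filter (fun p => decide (p.1 < (nw.length : Int)) && (nw.getD p.1.toNat ' ' == p.2))).Nodup :=
    ((pv_enum_nodup H).filter _).filter _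
  rw [List.perm_ext_iff_of_nodup hnd1 hnd2]
  intro q
  simp only [List.mem_filter, Bool.and_eq_true, beq_iff_eq, decide_eq_true_eq]
  constructor
  · rintro ⟨hqmem, hq⟩
    have hqE : q ∈ E := (hget q).mp hq
    rcases (PySem.List.mem_enumerate_iff nw 0 q).mp hqmem with ⟨k, hk, hqeq⟩
    refine ⟨hqE, ?_, ?_⟩
    · rw [hqeq]; simp; exact_mod_cast hk
    · rw [hqeq]; simp [List.getElem?_eq_getElem hk]
  · rintro ⟨hqE, hlt, hgetd⟩
    have hqenum : q ∈ PySem.List.enumerate H 0 := (List.mem_filter.mp hqE).1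
    rcases (PySem.List.mem_enumerate_iff H 0 q).mp hqenum with ⟨k, hk, hqeq⟩
    subst hqeq
    have hkn : k < nw.length := by
      simp at hlt; exact_mod_cast hlt
    have hnwk : nw[k] = H[k] := by
      simpa [List.getElem?_eq_getElem hkn] using hgetd
    refine ⟨?_, (hget _).mpr hqE⟩
    rw [PySem.List.mem_enumerate_iff nw 0 _]
    exact ⟨k, hkn, by simp [hnwk]⟩

-- ===== VERDICT (by name: the statement is the Claim_ definition above) =====
theorem hint_match_spec : Claim_equal_hint_match := by
  intro current hints puzzles _ hpre
  unfold Spec_hint_match hint_match hint_match_alt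
  rw [pv_word_eq puzzles current.toList []]
  have hsome := pv_mapM_isSome puzzles current.toList (List.all_eq_true.mp hpre)
  cases hm : current.toList.mapM (fun c => puzzles.lookup ((c.toNat : Int))) with
  | none => rw [hm] at hsome; simp at hsome
  | some parts =>
    simp only [Option.map_some, List.nil_append]
    set nw := (parts.map String.toList).flatten with hnw
    set hint := pvHintA hints.toList with hhint
    have hitems := pv_items_E hints.toList
    have hkeys : hint.keys.Nodup := by
      show (hint.items.map (fun p => p.1)).Nodup
      rw [hhint, hitems]; exact pv_E_fst_nodup hints.toList
    -- turn A's match-counter into a countP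
    have hbody : ∀ (acc : Int) (x : Int × Char), x ∈ PySem.List.enumerate nw 0 →
        (match hint.get? x.1 with
         | none => acc
         | some t => if t = x.2 then acc + 1 else acc)
        = (if (hint.get? x.1 == some x.2) then acc + 1 else acc) := by
      intro acc x _
      cases hg : hint.get? x.1 with
      | none => simp
      | some t => by_cases ht : t = x.2 <;> simp [ht]
    have hcount := PySem.List.foldl_congr_mem (PySem.List.enumerate nw 0) _ _ (0 : Int) hbody
    rw [hcount, PySem.List.foldl_if_add_one]
    have hsize : hint.size = ((PySem.List.enumerate hints.toList 0).filter (fun p => p.2 != '*')).length := by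
      show hint.items.length = _
      rw [hhint, hitems]
    rw [pv_count_eq hints.toList nw hint (by rw [hhint, hitems]) hkeys, hsize]
    unfold pvCheckB
    set E := (PySem.List.enumerate hints.toList 0).filter (fun p => p.2 != '*') with hEdef
    set pB := (fun p : Int × Char => decide (p.1 < (nw.length : Int)) && (nw.getD p.1.toNat ' ' == p.2)) with hpB
    by_cases hall : ∀ x ∈ E, pB x = true
    · rw [List.countP_eq_length.mpr hall]
      simp [List.all_eq_true.mpr hall]
    · have hne : E.countP pB ≠ E.length := fun h => hall (List.countP_eq_length.mp h)
      have hfalse : E.all pB = false := by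
        cases h2 : E.all pB
        · rfl
        · exact absurd (List.all_eq_true.mp h2) hall
      simp [hfalse, hne]
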